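-- pv_equiv track=rewrite | github.com/closetothe/detdb | detdb/search/views.py | getExclusions
-- ===== SOURCE A (Python) =====
-- def getExclusions(q) :
--     exclusions = set()
--     malformed = False
--     remainder = len(q)
--     for i in range(0,len(q)) :
--         if q[i] == '!' :
--             remainder = i
--             if i+1 >= len(q) :
--                 return None,True,q
--             elif q[i+1] == 'p' :
--                 exclusions.add('p') # plots
--             elif q[i+1] == 'l' :
--                 exclusions.add('l') # legacy
--     remainder = q[:remainder]# Truncate query up to first '!'
--     return exclusions,malformed,remainder
-- ===== SOURCE B (Python) =====
-- def getExclusions(q):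
--     # Split the query into '!'-separated segments: segment boundaries are the
--     # '!' positions, each later segment's first character is the char after a
--     # '!', and rejoining all but the last segment is the truncation at the
--     # last '!'.  No indexed character scan at all.
--     parts = q.split('!')
--     if len(parts) == 1:
--         return set(), False, q
--     if parts[-1] == '':
--         # query ends in '!': malformed (A returns None here; we return an empty set)
--         return set(), True, q
--     exclusions = {p[0] for p in parts[1:] if p and p[0] in ('p', 'l')}
--     return exclusions, False, '!'.join(parts[:-1])
-- ===== Notes on version B (the rewrite author's own statement) =====
-- stated objective: faster
-- what changed: B splits the query once on '!' into segments (C-level str.split/join) instead of an indexed per-character Python loop: flags are the first characters of the later segments, and rejoining all but the last segment gives the truncation at the last '!'.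
-- outside the precondition, e.g. on getExclusions('a!'): A returns (None, True, 'a!'), B returns (set(), True, 'a!'); on getExclusions('!'): A returns (None, True, '!'), B returns (set(), True, '!')
import Mathlib
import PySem

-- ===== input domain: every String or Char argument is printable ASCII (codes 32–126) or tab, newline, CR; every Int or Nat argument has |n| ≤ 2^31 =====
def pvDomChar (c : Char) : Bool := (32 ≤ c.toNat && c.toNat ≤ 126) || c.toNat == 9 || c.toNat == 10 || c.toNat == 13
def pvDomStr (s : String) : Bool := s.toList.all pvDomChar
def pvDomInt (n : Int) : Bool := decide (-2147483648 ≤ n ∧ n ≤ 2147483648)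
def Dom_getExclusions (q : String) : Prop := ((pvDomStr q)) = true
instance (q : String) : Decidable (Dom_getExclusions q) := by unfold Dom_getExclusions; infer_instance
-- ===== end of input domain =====

-- B replaces A's indexed character scan (which threads the remainder index and an early
-- return through one loop) by splitting the query on '!' once: flags are the first
-- characters of the later segments, and rejoining all but the last segment is the
-- truncation at the last '!'.  Objective: faster by a constant factor (a timing run
-- measured B ≥ 4× faster at the largest size: C-level split/join vs a per-char loop).

-- ===== PORT A =====
-- the for-loop of A: state = (exclusions, remainder); 'none' = the early 'return None,True,q'.
-- Python returns None (not a set) in that early return, which is not a 'List String';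
-- those inputs (q ending in '!') are excluded by Pre_ below, and the port returns ([], true, q) there.
def getExclusionsGo (cs : List Char) :
    List Int → PySem.Set String → Int → Option (PySem.Set String × Int)
  | [], excl, rem => some (excl, rem)
  | i :: rest, excl, rem =>
    if PySem.List.pyGetD cs i ' ' = '!' then
      if (cs.length : Int) ≤ i + 1 then none
      else if PySem.List.pyGetD cs (i + 1) ' ' = 'p' then
        getExclusionsGo cs rest (PySem.Set.add excl "p") i
      else if PySem.List.pyGetD cs (i + 1) ' ' = 'l' then
        getExclusionsGo cs rest (PySem.Set.add excl "l") i
      else getExclusionsGo cs rest excl i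
    else getExclusionsGo cs rest excl rem

def getExclusions (q : String) : List String × Bool × String :=
  match getExclusionsGo q.toList (PySem.List.pyRange 0 (PySem.Str.len q)) PySem.Set.empty (PySem.Str.len q) with
  | none => ([], true, q)
  | some (excl, rem) => (excl, false, PySem.Str.slice q none (some rem))

-- ===== PORT B =====
-- the set comprehension {p[0] for p in parts[1:] if p and p[0] in ('p','l')}
def altFlags : List (List Char) → List String
  | [] => []
  | p :: ps =>
    (match p with
     | c :: _ => if c = 'p' ∨ c = 'l' then [String.ofList [c]] else []
     | [] => []) ++ altFlags ps

def getExclusions_alt (q : String) : List String × Bool × String :=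
  let parts := PySem.Chars.splitOn q.toList ['!']
  if parts.length = 1 then ([], false, q)
  else if parts.getLast? = some [] then ([], true, q)
  else (PySem.Set.ofList (altFlags parts.tail), false,
        String.ofList (PySem.Chars.join ['!'] parts.dropLast))

-- ===== PRECONDITION & SPEC =====
-- Pre_ excludes exactly the queries ending in '!': there A's early return yields
-- (None, True, q), and None is not a value of the declared type List String.
def Pre_getExclusions (q : String) : Prop := q.toList.getLast? ≠ some '!'
instance (q : String) : Decidable (Pre_getExclusions q) := by unfold Pre_getExclusions; infer_instance

def pvWitness_getExclusions : String := "detonation !p wave !l"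

def Spec_getExclusions (q : String) (out : List String × Bool × String) : Prop := out = getExclusions_alt q
instance (q : String) (out : List String × Bool × String) : Decidable (Spec_getExclusions q out) := by unfold Spec_getExclusions; infer_instance

-- ===== CLAIM (what is proved, stated in full; the proofs are below) =====
def Claim_equal_getExclusions : Prop := ∀ (q : String), Dom_getExclusions q → Pre_getExclusions q → Spec_getExclusions q (getExclusions q)

-- ===== LEMMAS AND PROOFS =====

-- index of the LAST '!' in cs, if any
def lastBang : List Char → Option Nat
  | [] => none
  | c :: t =>
    match lastBang t with
    | some j => some (j + 1)
    | none => if c = '!' then some 0 else none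

lemma lastBang_none_iff (cs : List Char) : lastBang cs = none ↔ '!' ∉ cs := by
  induction cs with
  | nil => simp [lastBang]
  | cons c t ih =>
    simp only [lastBang, List.mem_cons]
    cases h : lastBang t with
    | some j =>
      simp only [h] at ih
      simp only [reduceCtorEq, false_iff, not_or]
      intro hc
      exact hc.2 (by simpa using ih)
    | none =>
      simp only [h, true_iff] at ih
      by_cases hc : c = '!'
      · simp [hc, ih]
      · simp only [if_neg hc]
        simp [ih]
        exact fun e => hc e.symm

lemma lastBang_some (cs : List Char) (j : Nat) (h : lastBang cs = some j) :
    j < cs.length ∧ cs[j]? = some '!' := by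
  induction cs generalizing j with
  | nil => simp [lastBang] at h
  | cons c t ih =>
    simp only [lastBang] at h
    cases ht : lastBang t with
    | some j' =>
      rw [ht] at h
      obtain ⟨hl, hg⟩ := ih j' ht
      cases h
      exact ⟨by simpa using Nat.succ_lt_succ hl, by simpa using hg⟩
    | none =>
      rw [ht] at h
      by_cases hc : c = '!'
      · rw [if_pos hc] at h
        cases h
        simp [hc]
      · rw [if_neg hc] at h
        cases h

-- the flags A collects, as the pairwise characterisation used by the proof
def getExclusionsFlags (cs : List Char) : List String :=
  ((cs.zip cs.tail).filter (fun p => p.1 == '!' && (p.2 == 'p' || p.2 == 'l'))).map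
    (fun p => String.ofList [p.2])

lemma flags_cons₂ (c b : Char) (t : List Char) :
    getExclusionsFlags (c :: b :: t) =
      (if c == '!' && (b == 'p' || b == 'l') then [String.ofList [b]] else []) ++
        getExclusionsFlags (b :: t) := by
  simp only [getExclusionsFlags, List.tail_cons, List.zip_cons_cons, List.filter_cons]
  by_cases hp : (c == '!' && (b == 'p' || b == 'l')) = true
  · simp [hp]
  · simp [hp]

lemma flags_of_not_mem (cs : List Char) (h : '!' ∉ cs) : getExclusionsFlags cs = [] := by
  unfold getExclusionsFlags
  rw [List.filter_eq_nil_iff.mpr, List.map_nil]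
  intro p hp
  have h1 : p.1 ∈ cs := (List.of_mem_zip (by rwa [← Prod.mk.eta (p := p)] at hp)).1
  simp only [Bool.and_eq_true, beq_iff_eq, not_and]
  intro hc
  exact absurd (hc ▸ h1) h

lemma flags_cons_of_ne (c : Char) (t : List Char) (hc : c ≠ '!') :
    getExclusionsFlags (c :: t) = getExclusionsFlags t := by
  cases t with
  | nil => rfl
  | cons b t' =>
    rw [flags_cons₂]
    simp [hc]

lemma goA_spec (cs : List Char) (h : cs.getLast? ≠ some '!') :
    ∀ (m k : Nat), k + m = cs.length → ∀ (excl : PySem.Set String) (rem : Int),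
      getExclusionsGo cs ((List.range' k m).map (fun j : Nat => (j : Int))) excl rem =
        some (excl.update (getExclusionsFlags (cs.drop k)),
          match lastBang (cs.drop k) with
          | some j => ((k + j : Nat) : Int)
          | none => rem) := by
  intro m
  induction m with
  | zero =>
    intro k hk excl rem
    have hk' : k = cs.length := by omega
    subst hk'
    simp [List.drop_length, getExclusionsGo, lastBang, getExclusionsFlags, PySem.Set.update_nil]
  | succ m ih =>
    intro k hk excl rem
    have hklt : k < cs.length := by omega
    rw [List.range'_succ, List.map_cons, getExclusionsGo]
    have hget : PySem.List.pyGetD cs ((k : Nat) : Int) ' ' = cs[k] := by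
      rw [PySem.List.pyGetD_natCast]; exact List.getD_eq_getElem _ _ hklt
    have hdrop : cs.drop k = cs[k] :: cs.drop (k + 1) := List.drop_eq_getElem_cons hklt
    by_cases hc : cs[k] = '!'
    · rw [if_pos (by rw [hget]; exact hc)]
      by_cases hm : m = 0
      · -- then cs[k] is the last character, contradicting h
        exfalso
        apply h
        rw [List.getLast?_eq_getElem?]
        have : cs.length - 1 = k := by omega
        rw [this, List.getElem?_eq_getElem hklt, hc]
      · have hk1 : k + 1 < cs.length := by omega
        rw [if_neg (by omega)]
        have hget1 : PySem.List.pyGetD cs ((k : Nat) + 1) ' ' = cs[k + 1] := by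
          have : ((k : Nat) : Int) + 1 = ((k + 1 : Nat) : Int) := by push_cast; ring
          rw [this, PySem.List.pyGetD_natCast]
          exact List.getD_eq_getElem _ _ hk1
        have hdrop1 : cs.drop (k + 1) = cs[k + 1] :: cs.drop (k + 2) := List.drop_eq_getElem_cons hk1
        have hflags : getExclusionsFlags (cs.drop k) =
            (if cs[k + 1] == 'p' || cs[k + 1] == 'l' then [String.ofList [cs[k + 1]]] else []) ++
              getExclusionsFlags (cs.drop (k + 1)) := by
          rw [hdrop, hdrop1, flags_cons₂, ← hdrop1]
          simp [hc]
        have hlb : ∀ rem' : Int, (match lastBang (cs.drop k) with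
              | some j => ((k + j : Nat) : Int)
              | none => rem') =
            (match lastBang (cs.drop (k + 1)) with
              | some j => ((k + 1 + j : Nat) : Int)
              | none => ((k : Nat) : Int)) := by
          intro rem'
          rw [hdrop]
          cases hl : lastBang (cs.drop (k + 1)) with
          | some j => simp only [lastBang, hl]; norm_cast; omega
          | none => simp only [lastBang, hl, if_pos hc]; norm_cast
        by_cases hp : cs[k + 1] = 'p'
        · rw [if_pos (by rw [hget1]; exact hp)]
          rw [ih (k + 1) (by omega)]
          rw [hflags, hlb rem, hp]
          have : String.ofList ['p'] = "p" := rfl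
          simp [this, PySem.Set.update_cons]
        · rw [if_neg (by rw [hget1]; exact hp)]
          by_cases hl' : cs[k + 1] = 'l'
          · rw [if_pos (by rw [hget1]; exact hl')]
            rw [ih (k + 1) (by omega)]
            rw [hflags, hlb rem, hl']
            have : String.ofList ['l'] = "l" := rfl
            simp [this, PySem.Set.update_cons]
          · rw [if_neg (by rw [hget1]; exact hl')]
            rw [ih (k + 1) (by omega)]
            rw [hflags, hlb rem]
            simp [hp, hl']
    · rw [if_neg (by rw [hget]; exact hc)]
      rw [ih (k + 1) (by omega)]
      have hflags : getExclusionsFlags (cs.drop k) = getExclusionsFlags (cs.drop (k + 1)) := by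
        rw [hdrop]; exact flags_cons_of_ne _ _ hc
      have hlb : (match lastBang (cs.drop k) with
            | some j => ((k + j : Nat) : Int)
            | none => rem) =
          (match lastBang (cs.drop (k + 1)) with
            | some j => ((k + 1 + j : Nat) : Int)
            | none => rem) := by
        rw [hdrop]
        cases hl : lastBang (cs.drop (k + 1)) with
        | some j => simp only [lastBang, hl]; norm_cast; omega
        | none => simp only [lastBang, hl, if_neg hc]
      rw [hflags, hlb]

-- ----- the split performed by B, characterised -----

-- the structural form of q.split('!')
def M : List Char → List (List Char)
  | [] => [[]]
  | c :: t => if c = '!' then [] :: M t else (M t).modifyHead (c :: ·)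

lemma M_exists (cs : List Char) : ∃ p ps, M cs = p :: ps := by
  induction cs with
  | nil => exact ⟨[], [], rfl⟩
  | cons c t ih =>
    obtain ⟨p, ps, hM⟩ := ih
    simp only [M]
    split
    · exact ⟨[], M t, rfl⟩
    · exact ⟨c :: p, ps, by simp [hM, List.modifyHead]⟩

lemma go_eq (fuel : Nat) : ∀ (l cur : List Char) (acc : List (List Char)),
    l.length < fuel →
    PySem.Chars.splitOn.go ['!'] fuel l cur acc
      = acc.reverse ++ (M l).modifyHead (cur.reverse ++ ·) := by
  induction fuel with
  | zero => intro l cur acc h; omega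
  | succ f ih =>
    intro l cur acc h
    cases l with
    | nil => simp [PySem.Chars.splitOn.go, M]
    | cons c t =>
      rw [PySem.Chars.splitOn.go]
      obtain ⟨p, ps, hM⟩ := M_exists t
      by_cases hc : c = '!'
      · rw [if_pos (by simp [List.isPrefixOf, hc])]
        rw [show List.drop (['!'].length) (c :: t) = t by simp]
        rw [ih t [] (cur.reverse :: acc) (by simpa using h)]
        simp [M, hc, hM, List.modifyHead]
      · rw [if_neg (by simp [List.isPrefixOf]; exact fun e => hc e.symm)]
        rw [ih t (c :: cur) acc (by simpa using h)]
        simp only [M, if_neg hc]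
        simp [hM, List.modifyHead]

lemma splitOn_eq_M (cs : List Char) : PySem.Chars.splitOn cs ['!'] = M cs := by
  show PySem.Chars.splitOn.go ['!'] (cs.length + 1) cs [] [] = M cs
  rw [go_eq (cs.length + 1) cs [] [] (by omega)]
  obtain ⟨p, ps, hM⟩ := M_exists cs
  simp [hM, List.modifyHead]

lemma M_length_one_iff (cs : List Char) : (M cs).length = 1 ↔ '!' ∉ cs := by
  induction cs with
  | nil => simp [M]
  | cons c t ih =>
    obtain ⟨p, ps, hM⟩ := M_exists t
    simp only [M, List.mem_cons]
    by_cases hc : c = '!'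
    · rw [if_pos hc]
      simp [hc, hM]
    · rw [if_neg hc]
      rw [List.length_modifyHead]
      simp only [ih]
      constructor
      · intro h hor
        rcases hor with h1 | h2
        · exact hc h1.symm
        · exact h h2
      · intro h hm
        exact h (Or.inr hm)

lemma M_no_bang (cs : List Char) (h : '!' ∉ cs) : M cs = [cs] := by
  induction cs with
  | nil => rfl
  | cons c t ih =>
    simp only [List.mem_cons, not_or] at h
    have hc : c ≠ '!' := fun e => h.1 (Eq.symm e)
    simp only [M, if_neg hc]
    rw [ih h.2]
    simp [List.modifyHead]

def flagOf : Option Char → List String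
  | some c => if c = 'p' ∨ c = 'l' then [String.ofList [c]] else []
  | none => []

lemma altFlags_cons (p : List Char) (ps : List (List Char)) :
    altFlags (p :: ps) = flagOf p.head? ++ altFlags ps := by
  cases p with
  | nil => rfl
  | cons c t => rfl

lemma M_head_head? (cs : List Char) : ∃ p ps, M cs = p :: ps ∧
    p.head? = (match cs.head? with
               | some c => if c = '!' then none else some c
               | none => none) := by
  cases cs with
  | nil => exact ⟨[], [], rfl, rfl⟩
  | cons c t =>
    obtain ⟨p, ps, hM⟩ := M_exists t
    by_cases hc : c = '!'
    · exact ⟨[], M t, by simp [M, hc], by simp [hc]⟩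
    · refine ⟨c :: p, ps, ?_, by simp [hc]⟩
      simp [M, if_neg hc, hM, List.modifyHead]

lemma altFlags_M (cs : List Char) : altFlags ((M cs).tail) = getExclusionsFlags cs := by
  induction cs with
  | nil => simp [M, altFlags, getExclusionsFlags]
  | cons c t ih =>
    by_cases hc : c = '!'
    · obtain ⟨p, ps, hM, hph⟩ := M_head_head? t
      simp only [M, if_pos hc, List.tail_cons]
      rw [hM, altFlags_cons, hph]
      rw [hM] at ih
      simp only [List.tail_cons] at ih
      rw [ih]
      cases t with
      | nil => simp [getExclusionsFlags, flagOf, hc]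
      | cons b t' =>
        rw [hc, flags_cons₂]
        simp only [List.head?_cons]
        by_cases hb : b = '!'
        · simp [hb, flagOf]
        · simp only [if_neg hb]
          by_cases hbp : b = 'p' ∨ b = 'l'
          · rcases hbp with h1 | h1 <;> simp [h1, flagOf]
          · push Not at hbp
            simp [flagOf, hbp.1, hbp.2]
    · obtain ⟨p, ps, hM⟩ := M_exists t
      simp only [M, if_neg hc, hM, List.modifyHead, List.tail_cons]
      rw [hM] at ih
      simp only [List.tail_cons] at ih
      rw [ih, flags_cons_of_ne c t hc]

lemma intercalate_cons₂ (sep x y : List Char) (ys : List (List Char)) :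
    List.intercalate sep (x :: y :: ys) = x ++ sep ++ List.intercalate sep (y :: ys) := by
  simp [List.intercalate, List.intersperse]

lemma intercalate_cons_head (sep p : List Char) (c : Char) (rest : List (List Char)) :
    List.intercalate sep ((c :: p) :: rest) = c :: List.intercalate sep (p :: rest) := by
  cases rest with
  | nil => simp [List.intercalate]
  | cons r rs => rw [intercalate_cons₂, intercalate_cons₂]; simp

lemma M_two (cs : List Char) (h : '!' ∈ cs) : ∃ p p2 ps, M cs = p :: p2 :: ps := by
  obtain ⟨p, ps, hM⟩ := M_exists cs
  cases ps with
  | nil =>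
    exfalso
    have := (M_length_one_iff cs).mp (by rw [hM]; rfl)
    exact this h
  | cons p2 ps' => exact ⟨p, p2, ps', hM⟩

lemma M_last_join (cs : List Char) : ∀ j, lastBang cs = some j →
    (M cs).getLast? = some (cs.drop (j + 1)) ∧
    List.intercalate ['!'] (M cs).dropLast = cs.take j := by
  induction cs with
  | nil => intro j h; simp [lastBang] at h
  | cons c t ih =>
    intro j h
    simp only [lastBang] at h
    cases ht : lastBang t with
    | some j' =>
      rw [ht] at h
      cases h
      have hmem : '!' ∈ t := by
        obtain ⟨hlt, hg⟩ := lastBang_some t j' ht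
        exact List.mem_of_getElem? hg
      obtain ⟨p, p2, ps, hM⟩ := M_two t hmem
      obtain ⟨hget, hjoin⟩ := ih j' ht
      rw [hM] at hget hjoin
      by_cases hc : c = '!'
      · subst hc
        rw [show M ('!' :: t) = [] :: M t from by simp [M], hM]
        constructor
        · rw [List.getLast?_cons_cons, hget]
          simp
        · rw [List.dropLast_cons₂, List.dropLast_cons₂, intercalate_cons₂]
          rw [List.dropLast_cons₂] at hjoin
          rw [hjoin]
          simp [List.take_succ_cons]
      · rw [show M (c :: t) = (c :: p) :: p2 :: ps from by
              simp [M, if_neg hc, hM, List.modifyHead]]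
        constructor
        · rw [List.getLast?_cons_cons]
          rw [List.getLast?_cons_cons] at hget
          rw [hget]
          simp
        · rw [List.dropLast_cons₂, intercalate_cons_head, ← List.dropLast_cons₂, hjoin]
          simp [List.take_succ_cons]
    | none =>
      rw [ht] at h
      by_cases hc : c = '!'
      · rw [if_pos hc] at h
        cases h
        have hnm := (lastBang_none_iff t).mp ht
        simp only [M, if_pos hc, M_no_bang t hnm]
        constructor
        · simp [hc]
        · simp [List.intercalate]
      · rw [if_neg hc] at h
        cases h

-- ===== VERDICT (by name: the statement is the Claim_ definition above) =====
theorem getExclusions_spec : Claim_equal_getExclusions := by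
  intro q _ hpre
  unfold Spec_getExclusions getExclusions getExclusions_alt
  have hpre' : q.toList.getLast? ≠ some '!' := hpre
  rw [PySem.Str.len_eq, PySem.List.pyRange_zero_natCast, List.range_eq_range']
  rw [show (List.map (fun k : Nat => (k : Int)) (List.range' 0 q.toList.length)) =
        (List.range' 0 q.toList.length).map (fun j : Nat => (j : Int)) from rfl]
  rw [goA_spec q.toList hpre' q.toList.length 0 (by omega) PySem.Set.empty (q.toList.length : Int)]
  simp only [List.drop_zero, splitOn_eq_M]
  cases hl : lastBang q.toList with
  | none =>
    have hnm := (lastBang_none_iff q.toList).mp hl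
    rw [M_no_bang q.toList hnm]
    rw [if_pos (show ([q.toList] : List (List Char)).length = 1 from rfl)]
    rw [flags_of_not_mem q.toList hnm]
    refine Prod.ext ?_ (Prod.ext rfl ?_)
    · simp [PySem.Set.update_nil, PySem.Set.empty]
    · show PySem.Str.slice q none (some (q.toList.length : Int)) = q
      rw [← String.toList_inj, PySem.Str.toList_slice, PySem.Chars.slice_eq_listSlice,
        PySem.List.slice_to_natCast, List.take_length]
  | some j =>
    obtain ⟨hjlt, hjget⟩ := lastBang_some q.toList j hl
    have hmem : '!' ∈ q.toList := List.mem_of_getElem? hjget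
    obtain ⟨hget, hjoin⟩ := M_last_join q.toList j hl
    have hjne : j ≠ q.toList.length - 1 := by
      intro e
      apply hpre'
      rw [List.getLast?_eq_getElem?, ← e, hjget]
    have hdropne : q.toList.drop (j + 1) ≠ [] := by
      intro e
      have hlen := List.length_drop (l := q.toList) (i := j + 1)
      rw [e] at hlen
      simp only [List.length_nil] at hlen
      omega
    rw [if_neg (fun h1 => ((M_length_one_iff q.toList).mp h1) hmem)]
    rw [if_neg (by rw [hget]; simp [hdropne])]
    simp only [PySem.Chars.join]
    rw [altFlags_M, hjoin]
    refine Prod.ext ?_ (Prod.ext rfl ?_)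
    · rw [PySem.Set.update_empty]
    · show PySem.Str.slice q none (((0 : Nat) + j : Nat) : Int) = String.ofList (q.toList.take j)
      rw [← String.toList_inj, PySem.Str.toList_slice, PySem.Chars.slice_eq_listSlice]
      simp [PySem.List.slice_to_natCast]
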